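-- pv_equiv track=rewrite | github.com/phoebemtg/lifestring | python-backend/app/services/realtime_service.py | _filter_events_by_interests
-- ===== SOURCE A (Python) =====
-- from typing import Dict, Any, Optional, List
--
-- def _filter_events_by_interests(events: List[Dict[str, Any]], user_interests: List[str]) -> List[Dict[str, Any]]:
--     """Filter events based on user interests."""
--     if not user_interests:
--         return events
--
--     filtered_events = []
--     interest_keywords = {
--         'hiking': ['hiking', 'trail', 'mountain', 'outdoor', 'nature', 'park', 'walk'],
--         'climbing': ['climbing', 'rock', 'boulder', 'mountain', 'outdoor'],
--         'boating': ['boating', 'sailing', 'water', 'lake', 'river', 'marina', 'kayak'],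
--         'skiing': ['skiing', 'snow', 'winter', 'mountain', 'resort'],
--         'art': ['art', 'gallery', 'museum', 'creative', 'artist', 'exhibition', 'photography'],
--         'music': ['music', 'concert', 'band', 'jazz', 'festival', 'symphony', 'live', 'show', 'performance'],
--         'entertainment': ['entertainment', 'comedy', 'show', 'performance', 'theater', 'live'],
--         'food': ['food', 'restaurant', 'culinary', 'cooking', 'farmers market', 'dining', 'beer', 'festival'],
--         'fitness': ['fitness', 'gym', 'yoga', 'workout', 'sports', 'active', 'biking'],
--         'culture': ['culture', 'museum', 'history', 'temple', 'heritage'],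
--         'social': ['social', 'community', 'meetup', 'gathering', 'festival'],
--         'sports': ['sports', 'basketball', 'jazz', 'game', 'arena', 'team']
--     }
--
--     for event in events:
--         event_text = f"{event.get('title', '')} {event.get('description', '')} {event.get('event_type', '')}".lower()
--
--         # Check if event matches any user interest
--         matches_interest = False
--         for interest in user_interests:
--             interest_lower = interest.lower()
--             # Direct match
--             if interest_lower in event_text:
--                 matches_interest = True
--                 break
--             # Keyword match
--             if interest_lower in interest_keywords:
--                 for keyword in interest_keywords[interest_lower]:
--                     if keyword in event_text:
--                         matches_interest = True
--                         break
--             if matches_interest: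
--                 break
--
--         if matches_interest:
--             filtered_events.append(event)
--
--     return filtered_events
-- ===== SOURCE B (Python) =====
-- from typing import Dict, Any, List
--
-- # Keyword table stored compactly as comma-separated strings, split on demand.
-- _INTEREST_KEYWORDS = {
--     'hiking': 'hiking,trail,mountain,outdoor,nature,park,walk',
--     'climbing': 'climbing,rock,boulder,mountain,outdoor',
--     'boating': 'boating,sailing,water,lake,river,marina,kayak',
--     'skiing': 'skiing,snow,winter,mountain,resort',
--     'art': 'art,gallery,museum,creative,artist,exhibition,photography',
--     'music': 'music,concert,band,jazz,festival,symphony,live,show,performance',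
--     'entertainment': 'entertainment,comedy,show,performance,theater,live',
--     'food': 'food,restaurant,culinary,cooking,farmers market,dining,beer,festival',
--     'fitness': 'fitness,gym,yoga,workout,sports,active,biking',
--     'culture': 'culture,museum,history,temple,heritage',
--     'social': 'social,community,meetup,gathering,festival',
--     'sports': 'sports,basketball,jazz,game,arena,team',
-- }
--
--
-- def _text(event):
--     return " ".join((event.get('title', ''),
--                      event.get('description', ''),
--                      event.get('event_type', ''))).lower()
--
--
-- def _filter_events_by_interests(events: List[Dict[str, Any]], user_interests: List[str]) -> List[Dict[str, Any]]:
--     """Filter events based on user interests (precomputed term set, flat scan)."""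
--     if not user_interests:
--         return events
--
--     terms = set()
--     for interest in user_interests:
--         il = interest.lower()
--         terms.add(il)
--         if il in _INTEREST_KEYWORDS:
--             terms.update(_INTEREST_KEYWORDS[il].split(','))
--
--     return [e for e in events if any(t in _text(e) for t in terms)]
-- ===== Notes on version B (the rewrite author's own statement) =====
-- stated objective: alternative
-- what changed: B precomputes one deduplicated set of search terms (each lowercased interest plus its keyword expansion, with the keyword table stored as comma-joined strings split once) before the event loop, then filters events with a single flat any-term scan, replacing A's per-event nested interest-and-keyword loops with break flags.
import Mathlib
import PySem

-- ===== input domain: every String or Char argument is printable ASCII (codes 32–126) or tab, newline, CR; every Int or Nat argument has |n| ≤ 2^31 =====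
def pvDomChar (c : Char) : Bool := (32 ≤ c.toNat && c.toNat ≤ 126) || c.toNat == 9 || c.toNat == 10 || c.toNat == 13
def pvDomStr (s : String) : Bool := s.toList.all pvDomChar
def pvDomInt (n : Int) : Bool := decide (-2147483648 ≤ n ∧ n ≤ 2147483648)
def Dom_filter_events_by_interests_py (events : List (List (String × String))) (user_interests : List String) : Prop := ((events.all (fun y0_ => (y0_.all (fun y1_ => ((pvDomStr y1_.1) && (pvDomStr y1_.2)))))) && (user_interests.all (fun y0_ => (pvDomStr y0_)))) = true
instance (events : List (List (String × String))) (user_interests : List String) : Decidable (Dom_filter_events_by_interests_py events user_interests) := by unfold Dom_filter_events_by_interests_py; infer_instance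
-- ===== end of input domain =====

-- B builds one deduplicated set of search terms up front (lowered interests plus their keyword expansions, stored as comma-joined strings and split once) and then filters events with a flat any-term scan, replacing A's per-event nested interest/keyword loops with break flags.


-- ===== PORT A =====
-- A's literal interest_keywords dict (lists of keywords)
def pvKwA : PySem.Dict String (List String) := PySem.Dict.mk [
  ("hiking", ["hiking", "trail", "mountain", "outdoor", "nature", "park", "walk"]),
  ("climbing", ["climbing", "rock", "boulder", "mountain", "outdoor"]),
  ("boating", ["boating", "sailing", "water", "lake", "river", "marina", "kayak"]),
  ("skiing", ["skiing", "snow", "winter", "mountain", "resort"]),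
  ("art", ["art", "gallery", "museum", "creative", "artist", "exhibition", "photography"]),
  ("music", ["music", "concert", "band", "jazz", "festival", "symphony", "live", "show", "performance"]),
  ("entertainment", ["entertainment", "comedy", "show", "performance", "theater", "live"]),
  ("food", ["food", "restaurant", "culinary", "cooking", "farmers market", "dining", "beer", "festival"]),
  ("fitness", ["fitness", "gym", "yoga", "workout", "sports", "active", "biking"]),
  ("culture", ["culture", "museum", "history", "temple", "heritage"]),
  ("social", ["social", "community", "meetup", "gathering", "festival"]),
  ("sports", ["sports", "basketball", "jazz", "game", "arena", "team"])]

-- A's f"{event.get('title','')} {event.get('description','')} {event.get('event_type','')}".lower()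
def pvTextA (e : List (String × String)) : List Char :=
  PySem.Chars.lower
    ((((PySem.Dict.mk e).getD "title" "").toList ++ ' ' :: ((PySem.Dict.mk e).getD "description" "").toList)
      ++ ' ' :: ((PySem.Dict.mk e).getD "event_type" "").toList)

-- A's inner 'for interest in user_interests' loop with its break flags
def pvAMatch (text : List Char) : List String → Bool
  | [] => false
  | interest :: rest =>
    let il := PySem.Str.lower interest
    if PySem.Chars.isIn il.toList text then true
    else if pvKwA.contains il then
      if (pvKwA.getD il []).any (fun k => PySem.Chars.isIn k.toList text) then true
      else pvAMatch text rest
    else pvAMatch text rest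

def filter_events_by_interests_py (events : List (List (String × String))) (user_interests : List String) : List (List (String × String)) :=
  if user_interests = [] then events
  else events.foldl (fun acc e => if pvAMatch (pvTextA e) user_interests then acc ++ [e] else acc) []

-- ===== PORT B =====
-- B's keyword table: comma-joined keyword strings, split on demand
def pvKwB : PySem.Dict String String := PySem.Dict.mk [
  ("hiking", "hiking,trail,mountain,outdoor,nature,park,walk"),
  ("climbing", "climbing,rock,boulder,mountain,outdoor"),
  ("boating", "boating,sailing,water,lake,river,marina,kayak"),
  ("skiing", "skiing,snow,winter,mountain,resort"),
  ("art", "art,gallery,museum,creative,artist,exhibition,photography"),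
  ("music", "music,concert,band,jazz,festival,symphony,live,show,performance"),
  ("entertainment", "entertainment,comedy,show,performance,theater,live"),
  ("food", "food,restaurant,culinary,cooking,farmers market,dining,beer,festival"),
  ("fitness", "fitness,gym,yoga,workout,sports,active,biking"),
  ("culture", "culture,museum,history,temple,heritage"),
  ("social", "social,community,meetup,gathering,festival"),
  ("sports", "sports,basketball,jazz,game,arena,team")]

-- B's _text helper: " ".join((title, description, event_type)).lower()
def pvTextB (e : List (String × String)) : List Char :=
  PySem.Chars.lower (PySem.Chars.join [' ']
    [((PySem.Dict.mk e).getD "title" "").toList,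
     ((PySem.Dict.mk e).getD "description" "").toList,
     ((PySem.Dict.mk e).getD "event_type" "").toList])

-- B's one-time term-set build: terms.add(il); terms.update(kw[il].split(','))
def pvTermsB (user_interests : List String) : PySem.Set String :=
  user_interests.foldl (fun s interest =>
    let il := PySem.Str.lower interest
    let s' := PySem.Set.add s il
    if pvKwB.contains il then PySem.Set.update s' ((PySem.Str.split? (pvKwB.getD il "") ",").getD []) else s')
    PySem.Set.empty

def filter_events_by_interests_py_alt (events : List (List (String × String))) (user_interests : List String) : List (List (String × String)) :=
  if user_interests = [] then events
  else events.filter (fun e => (pvTermsB user_interests).any (fun t => PySem.Chars.isIn t.toList (pvTextB e)))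

-- ===== PRECONDITION & SPEC =====
def Spec_filter_events_by_interests_py (events : List (List (String × String))) (user_interests : List String) (out : List (List (String × String))) : Prop := out = filter_events_by_interests_py_alt events user_interests
instance (events : List (List (String × String))) (user_interests : List String) (out : List (List (String × String))) : Decidable (Spec_filter_events_by_interests_py events user_interests out) := by unfold Spec_filter_events_by_interests_py; infer_instance

-- ===== CLAIM (what is proved, stated in full; the proofs are below) =====
def Claim_equal_filter_events_by_interests_py : Prop := ∀ (events : List (List (String × String))) (user_interests : List String), Dom_filter_events_by_interests_py events user_interests → Spec_filter_events_by_interests_py events user_interests (filter_events_by_interests_py events user_interests)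

-- ===== LEMMAS AND PROOFS =====

-- the two keyword tables agree: same keys, and B's comma-split values are A's lists
theorem pvKw_contains_eq (k : String) : pvKwB.contains k = pvKwA.contains k := by
  simp only [pvKwA, pvKwB, PySem.Dict.contains_mk, List.any_cons, List.any_nil]

theorem pvKw_getD_eq (k : String) (h : pvKwA.contains k = true) :
    (PySem.Str.split? (pvKwB.getD k "") ",").getD [] = pvKwA.getD k [] := by
  simp only [pvKwA, PySem.Dict.contains_mk, List.any_cons, List.any_nil,
    Bool.or_eq_true, beq_iff_eq] at h
  rcases h with h|h|h|h|h|h|h|h|h|h|h|h|h <;> first | (subst h; rfl) | simp at h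

-- the two event-text expressions compute the same string
theorem pvText_eq (e : List (String × String)) : pvTextB e = pvTextA e := by
  simp only [pvTextA, pvTextB, PySem.Chars.join_cons_cons, PySem.Chars.join_singleton]
  simp

-- the per-interest matching condition both programs test, as a proposition
abbrev pvHit (text : List Char) (i : String) : Prop :=
  PySem.Chars.isIn (PySem.Str.lower i).toList text = true ∨
    (pvKwA.contains (PySem.Str.lower i) = true ∧
      ∃ k ∈ pvKwA.getD (PySem.Str.lower i) [], PySem.Chars.isIn k.toList text = true)

-- membership in B's term set
theorem mem_pvTermsB (t : String) (l : List String) :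
    t ∈ pvTermsB l ↔ ∃ i ∈ l, t = PySem.Str.lower i ∨
      (pvKwA.contains (PySem.Str.lower i) = true ∧ t ∈ pvKwA.getD (PySem.Str.lower i) []) := by
  have key : ∀ (l : List String) (s : PySem.Set String),
      t ∈ l.foldl (fun s interest =>
        let il := PySem.Str.lower interest
        let s' := PySem.Set.add s il
        if pvKwB.contains il then PySem.Set.update s' ((PySem.Str.split? (pvKwB.getD il "") ",").getD []) else s') s
      ↔ t ∈ s ∨ ∃ i ∈ l, t = PySem.Str.lower i ∨
          (pvKwA.contains (PySem.Str.lower i) = true ∧ t ∈ pvKwA.getD (PySem.Str.lower i) []) := by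
    intro l
    induction l with
    | nil => simp
    | cons i rest ih =>
      intro s
      simp only [List.foldl_cons, ih]
      by_cases hc : pvKwA.contains (PySem.Str.lower i) = true
      · rw [if_pos (by rw [pvKw_contains_eq]; exact hc)]
        rw [PySem.Set.mem_update, PySem.Set.mem_add, pvKw_getD_eq _ hc]
        constructor
        · rintro (((hs | h) | h) | h)
          · exact Or.inl hs
          · exact Or.inr ⟨i, List.mem_cons_self, Or.inl h⟩
          · exact Or.inr ⟨i, List.mem_cons_self, Or.inr ⟨hc, h⟩⟩
          · obtain ⟨j, hj, hjt⟩ := h; exact Or.inr ⟨j, List.mem_cons_of_mem _ hj, hjt⟩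
        · rintro (hs | ⟨j, hj, hjt⟩)
          · exact Or.inl (Or.inl (Or.inl hs))
          · rcases List.mem_cons.mp hj with rfl | hj
            · rcases hjt with rfl | ⟨_, hk⟩
              · exact Or.inl (Or.inl (Or.inr rfl))
              · exact Or.inl (Or.inr hk)
            · exact Or.inr ⟨j, hj, hjt⟩
      · rw [if_neg (by rw [pvKw_contains_eq]; simpa using hc)]
        rw [PySem.Set.mem_add]
        constructor
        · rintro ((hs | h) | h)
          · exact Or.inl hs
          · exact Or.inr ⟨i, List.mem_cons_self, Or.inl h⟩
          · obtain ⟨j, hj, hjt⟩ := h; exact Or.inr ⟨j, List.mem_cons_of_mem _ hj, hjt⟩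
        · rintro (hs | ⟨j, hj, hjt⟩)
          · exact Or.inl (Or.inl hs)
          · rcases List.mem_cons.mp hj with rfl | hj
            · rcases hjt with rfl | ⟨hcon, _⟩
              · exact Or.inl (Or.inr rfl)
              · exact absurd hcon hc
            · exact Or.inr ⟨j, hj, hjt⟩
  rw [pvTermsB, key]
  simp [PySem.Set.empty]

-- A's break-flag loop returns true exactly when some interest hits
theorem pvAMatch_iff (text : List Char) (l : List String) :
    pvAMatch text l = true ↔ ∃ i ∈ l, pvHit text i := by
  induction l with
  | nil => simp [pvAMatch]
  | cons i rest ih =>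
    simp only [pvAMatch]
    by_cases h1 : PySem.Chars.isIn (PySem.Str.lower i).toList text = true
    · simp only [h1, if_true]
      exact iff_of_true (by trivial) ⟨i, List.mem_cons_self, Or.inl h1⟩
    · rw [Bool.not_eq_true] at h1
      simp only [h1, Bool.false_eq_true, if_false]
      by_cases hc : pvKwA.contains (PySem.Str.lower i) = true
      · simp only [hc, if_true]
        by_cases h2 : (pvKwA.getD (PySem.Str.lower i) []).any (fun k => PySem.Chars.isIn k.toList text) = true
        · simp only [h2, if_true]
          obtain ⟨k, hk, hkin⟩ := List.any_eq_true.mp h2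
          exact iff_of_true (by trivial) ⟨i, List.mem_cons_self, Or.inr ⟨hc, k, hk, by simpa using hkin⟩⟩
        · rw [Bool.not_eq_true] at h2
          simp only [h2, Bool.false_eq_true, if_false, ih]
          constructor
          · rintro ⟨j, hj, hPj⟩; exact ⟨j, List.mem_cons_of_mem _ hj, hPj⟩
          · rintro ⟨j, hj, hPj⟩
            rcases List.mem_cons.mp hj with rfl | hj
            · rcases hPj with hd | ⟨_, k, hk, hkin⟩
              · rw [h1] at hd; cases hd
              · have hx : (pvKwA.getD (PySem.Str.lower j) []).any
                    (fun k => PySem.Chars.isIn k.toList text) = true :=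
                  List.any_eq_true.mpr ⟨k, hk, hkin⟩
                rw [h2] at hx; cases hx
            · exact ⟨j, hj, hPj⟩
      · rw [Bool.not_eq_true] at hc
        simp only [hc, Bool.false_eq_true, if_false, ih]
        constructor
        · rintro ⟨j, hj, hPj⟩; exact ⟨j, List.mem_cons_of_mem _ hj, hPj⟩
        · rintro ⟨j, hj, hPj⟩
          rcases List.mem_cons.mp hj with rfl | hj
          · rcases hPj with hd | ⟨hcon, _⟩
            · rw [h1] at hd; cases hd
            · rw [hc] at hcon; cases hcon
          · exact ⟨j, hj, hPj⟩

-- A's match flag equals B's any-term test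
theorem pvAMatch_eq_any (text : List Char) (l : List String) :
    pvAMatch text l = (pvTermsB l).any (fun t => PySem.Chars.isIn t.toList text) := by
  rw [Bool.eq_iff_iff, pvAMatch_iff, List.any_eq_true]
  constructor
  · rintro ⟨i, hi, hd | ⟨hc, k, hk, hkin⟩⟩
    · exact ⟨PySem.Str.lower i, (mem_pvTermsB _ _).mpr ⟨i, hi, Or.inl rfl⟩, hd⟩
    · exact ⟨k, (mem_pvTermsB _ _).mpr ⟨i, hi, Or.inr ⟨hc, hk⟩⟩, hkin⟩
  · rintro ⟨t, ht, hin⟩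
    obtain ⟨i, hi, hcase⟩ := (mem_pvTermsB _ _).mp ht
    rcases hcase with rfl | ⟨hc, hk⟩
    · exact ⟨i, hi, Or.inl hin⟩
    · exact ⟨i, hi, Or.inr ⟨hc, t, hk, hin⟩⟩

-- ===== VERDICT (by name: the statement is the Claim_ definition above) =====
theorem filter_events_by_interests_py_spec : Claim_equal_filter_events_by_interests_py := by
  intro events user_interests _
  unfold Spec_filter_events_by_interests_py filter_events_by_interests_py filter_events_by_interests_py_alt
  by_cases h : user_interests = []
  · simp [h]
  · simp only [h, if_false]
    rw [PySem.List.foldl_append_if_eq_filter]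
    simp only [List.nil_append]
    exact List.filter_congr (fun e _ => by rw [pvAMatch_eq_any, pvText_eq])
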